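-- pv_equiv track=rewrite | github.com/karimbahgat/worldbank-boundary-paper-replic | scripts/visualize_global_lineage.py | get_source_class
-- ===== SOURCE A (Python) =====
-- def get_source_class(source, sources):
--     sources = [s.lower() for s in sources if s]
--     # gadm = contains "gadm"
--     test = lambda s: 'gadm' in s
--     if any([src for src in sources if test(src)]):
--         return 'GADM'
--     # gaul = contains "gaul"
--     test = lambda s: 'gaul' in s
--     if any([src for src in sources if test(src)]):
--         return 'GAUL'
--     # salb = contains "salb"
--     test = lambda s: 'salb' in s
--     if any([src for src in sources if test(src)]):
--         return 'SALB'
--     # osm = contains "osm"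
--     test = lambda s: 'osm' in s or 'openstreetmap' in s.replace(' ','')
--     if any([src for src in sources if test(src)]):
--         return 'OSM'
--     # ocha = contains "ocha"
--     # note, ignore listing ocha as a source for the ocha dataset/collection
--     test = lambda s: 'ocha' in s
--     if source != 'OCHA' and any([src for src in sources if test(src)]):
--         return 'OCHA'
--     # gov sources = contains "statist*","census","agency","bureau","ministr*","department","government*","national"
--     # note, salb dataset is automatically authoritative
--     test = lambda s: 'statist' in s \
--                         or 'census' in s \
--                         or 'agency' in s \
--                         or 'bureau' in s \
--                         or 'ministr' in s \
--                         or 'department' in s \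
--                         or 'government' in s \
--                         or 'national' in s
--     if source == 'SALB' or any([src for src in sources if test(src)]):
--         return 'Authoritative'
--     # other
--     return 'Other'
-- ===== SOURCE B (Python) =====
-- GOV_KEYWORDS = ('statist', 'census', 'agency', 'bureau', 'ministr',
--                 'department', 'government', 'national')
--
-- def get_source_class(source, sources):
--     gadm = gaul = salb = osm = ocha = gov = False
--     for raw in sources:
--         if not raw:
--             continue
--         s = raw.lower()
--         gadm = gadm or 'gadm' in s
--         gaul = gaul or 'gaul' in s
--         salb = salb or 'salb' in s
--         osm = osm or 'osm' in s or 'openstreetmap' in s.replace(' ', '')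
--         ocha = ocha or 'ocha' in s
--         gov = gov or any(k in s for k in GOV_KEYWORDS)
--     if gadm:
--         return 'GADM'
--     if gaul:
--         return 'GAUL'
--     if salb:
--         return 'SALB'
--     if osm:
--         return 'OSM'
--     if source != 'OCHA' and ocha:
--         return 'OCHA'
--     if source == 'SALB' or gov:
--         return 'Authoritative'
--     return 'Other'
-- ===== Notes on version B (the rewrite author's own statement) =====
-- stated objective: alternative
-- what changed: Replaces A's six separate filtered any()-passes over the normalized list with a single fold over the raw sources that lowercases each entry once and records six boolean category flags, followed by a flag-driven priority chain.
import Mathlib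
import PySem

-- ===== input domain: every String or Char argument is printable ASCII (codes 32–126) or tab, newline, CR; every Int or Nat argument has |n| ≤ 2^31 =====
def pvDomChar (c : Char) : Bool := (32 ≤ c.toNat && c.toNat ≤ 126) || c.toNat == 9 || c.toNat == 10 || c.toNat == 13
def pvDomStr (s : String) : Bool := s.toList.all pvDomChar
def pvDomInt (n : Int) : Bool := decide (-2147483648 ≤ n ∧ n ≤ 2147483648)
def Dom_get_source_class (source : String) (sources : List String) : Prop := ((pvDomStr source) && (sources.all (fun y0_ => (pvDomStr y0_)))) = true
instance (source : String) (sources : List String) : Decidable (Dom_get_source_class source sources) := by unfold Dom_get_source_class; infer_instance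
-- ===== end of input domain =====

-- B replaces A's six separate any()-passes over the normalized source list with one fold that
-- lowercases each source once and records six category flags, then a flag-driven priority chain;
-- return value only, no speed claim.


-- ===== PORT A =====
def get_source_class (source : String) (sources : List String) : String :=
  -- sources = [s.lower() for s in sources if s]
  let srcs := (sources.filter (fun s => decide (s ≠ ""))).map PySem.Str.lower
  -- any([src for src in sources if test(src)]) : any over the filtered list, string truthiness
  let anyTest := fun (t : String → Bool) =>
    (srcs.filter t).any (fun s => decide (s ≠ ""))
  if anyTest (fun s => PySem.Str.isIn "gadm" s) then "GADM"
  else if anyTest (fun s => PySem.Str.isIn "gaul" s) then "GAUL"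
  else if anyTest (fun s => PySem.Str.isIn "salb" s) then "SALB"
  else if anyTest (fun s => PySem.Str.isIn "osm" s
      || PySem.Str.isIn "openstreetmap" (PySem.Str.replace s " " "")) then "OSM"
  else if decide (source ≠ "OCHA") && anyTest (fun s => PySem.Str.isIn "ocha" s) then "OCHA"
  else if decide (source = "SALB") || anyTest (fun s =>
      PySem.Str.isIn "statist" s || PySem.Str.isIn "census" s || PySem.Str.isIn "agency" s
      || PySem.Str.isIn "bureau" s || PySem.Str.isIn "ministr" s || PySem.Str.isIn "department" s
      || PySem.Str.isIn "government" s || PySem.Str.isIn "national" s) then "Authoritative"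
  else "Other"


-- ===== PORT B =====
def gscGov (s : String) : Bool :=
  PySem.Str.isIn "statist" s || PySem.Str.isIn "census" s || PySem.Str.isIn "agency" s
  || PySem.Str.isIn "bureau" s || PySem.Str.isIn "ministr" s || PySem.Str.isIn "department" s
  || PySem.Str.isIn "government" s || PySem.Str.isIn "national" s

def gscStep (f : Bool × Bool × Bool × Bool × Bool × Bool) (raw : String) :
    Bool × Bool × Bool × Bool × Bool × Bool :=
  if raw = "" then f
  else
    let s := PySem.Str.lower raw
    (f.1 || PySem.Str.isIn "gadm" s,
     f.2.1 || PySem.Str.isIn "gaul" s,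
     f.2.2.1 || PySem.Str.isIn "salb" s,
     f.2.2.2.1 || PySem.Str.isIn "osm" s
        || PySem.Str.isIn "openstreetmap" (PySem.Str.replace s " " ""),
     f.2.2.2.2.1 || PySem.Str.isIn "ocha" s,
     f.2.2.2.2.2 || gscGov s)

def get_source_class_alt (source : String) (sources : List String) : String :=
  let f := sources.foldl gscStep (false, false, false, false, false, false)
  if f.1 then "GADM"
  else if f.2.1 then "GAUL"
  else if f.2.2.1 then "SALB"
  else if f.2.2.2.1 then "OSM"
  else if decide (source ≠ "OCHA") && f.2.2.2.2.1 then "OCHA"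
  else if decide (source = "SALB") || f.2.2.2.2.2 then "Authoritative"
  else "Other"


-- ===== PRECONDITION & SPEC =====
def Spec_get_source_class (source : String) (sources : List String) (out : String) : Prop := out = get_source_class_alt source sources
instance (source : String) (sources : List String) (out : String) : Decidable (Spec_get_source_class source sources out) := by unfold Spec_get_source_class; infer_instance

-- ===== CLAIM (what is proved, stated in full; the proofs are below) =====
def Claim_equal_get_source_class : Prop := ∀ (source : String) (sources : List String), Dom_get_source_class source sources → Spec_get_source_class source sources (get_source_class source sources)

-- ===== LEMMAS AND PROOFS =====


-- lowercasing a nonempty string yields a nonempty string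
lemma gsc_lower_ne_empty (s : String) (h : s ≠ "") : PySem.Str.lower s ≠ "" := by
  intro he
  have h2 := congrArg String.toList he
  simp [PySem.Chars.lower] at h2
  exact h h2

-- A's 'any([src for src in srcs if test(src)])' over a list of nonempty strings is 'srcs.any test'
lemma gsc_any_filter (l : List String) (t : String → Bool) (h : ∀ x ∈ l, x ≠ "") :
    (l.filter t).any (fun s => decide (s ≠ "")) = l.any t := by
  induction l with
  | nil => rfl
  | cons x xs ih =>
    have hx : decide (x ≠ "") = true := by simp [h x (by simp)]
    have ih' := ih (fun y hy => h y (List.mem_cons_of_mem _ hy))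
    rw [List.filter_cons]
    cases ht : t x
    · rw [if_neg (by simp_all), ih', List.any_cons, ht, Bool.false_or]
    · rw [if_pos (by simp_all), List.any_cons, List.any_cons, ht, hx, ih']

-- B's fold computes, flag by flag, the 'any' of each category test over the normalized list
lemma gsc_foldl (sources : List String) (f : Bool × Bool × Bool × Bool × Bool × Bool) :
    sources.foldl gscStep f =
      (let al := (sources.filter (fun s => decide (s ≠ ""))).map PySem.Str.lower
       (f.1 || al.any (fun s => PySem.Str.isIn "gadm" s),
        f.2.1 || al.any (fun s => PySem.Str.isIn "gaul" s),
        f.2.2.1 || al.any (fun s => PySem.Str.isIn "salb" s),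
        f.2.2.2.1 || al.any (fun s => PySem.Str.isIn "osm" s
            || PySem.Str.isIn "openstreetmap" (PySem.Str.replace s " " "")),
        f.2.2.2.2.1 || al.any (fun s => PySem.Str.isIn "ocha" s),
        f.2.2.2.2.2 || al.any gscGov)) := by
  induction sources generalizing f with
  | nil => simp
  | cons x xs ih =>
    by_cases hx : x = ""
    · simp [hx, gscStep, ih]
    · simp [List.foldl_cons, ih, hx, gscStep, Function.comp, Bool.or_assoc]

-- ===== VERDICT (by name: the statement is the Claim_ definition above) =====
theorem get_source_class_spec : Claim_equal_get_source_class := by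
  intro source sources _
  unfold Spec_get_source_class get_source_class get_source_class_alt
  rw [gsc_foldl]
  simp only [Bool.false_or]
  have hne : ∀ x ∈ (sources.filter (fun s => decide (s ≠ ""))).map PySem.Str.lower, x ≠ "" := by
    intro x hx
    rcases List.mem_map.mp hx with ⟨y, hy, rfl⟩
    exact gsc_lower_ne_empty y (by simpa using (List.mem_filter.mp hy).2)
  simp only [gsc_any_filter _ _ hne]
  have hg : (fun s : String =>
      PySem.Str.isIn "statist" s || PySem.Str.isIn "census" s || PySem.Str.isIn "agency" s
      || PySem.Str.isIn "bureau" s || PySem.Str.isIn "ministr" s || PySem.Str.isIn "department" s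
      || PySem.Str.isIn "government" s || PySem.Str.isIn "national" s) = gscGov := rfl
  rw [hg]
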